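-- pv_equiv track=rewrite | github.com/ArgoCanada/medsrtqc | medsrtqc/history.py | read_qc_hex
-- ===== SOURCE A (Python) =====
-- def read_qc_hex(hex_code):
--     num = int(hex_code, 16)
--     # list to save test number in
--     tests = []
--     for i in range(63, 56, -1):
--         qc_binary_id = 2**i
--         if qc_binary_id <= num:
--             num -= qc_binary_id
--             tests.append(i)
--
--     for i in range(26, 0, -1):
--         qc_binary_id = 2**i
--         if qc_binary_id <= num:
--             num -= qc_binary_id
--             tests.append(i)
--
--     if num != 0:
--         raise ValueError('Invalid input, decoding QC tests left a non-zero remainder')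
--
--     return tests[::-1]
-- ===== SOURCE B (Python) =====
-- def read_qc_hex(hex_code):
--     num = int(hex_code, 16)
--     # valid encodings have set bits only at positions 1..26 and 57..63
--     valid = (0 <= num < 2 ** 64
--              and num % 2 == 0
--              and (num // 2 ** 27) % 2 ** 30 == 0)
--     if not valid:
--         raise ValueError('Invalid input, decoding QC tests left a non-zero remainder')
--     return [i for i in range(64) if (num // 2 ** i) % 2 == 1]
-- ===== Notes on version B (the rewrite author's own statement) =====
-- stated objective: simpler
-- what changed: Replaces A's two greedy subtract-and-append loops over descending exponents plus a final remainder check and list reversal by a single arithmetic validity test on the parsed integer followed by one ascending enumeration of its set bits.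
import Mathlib
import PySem

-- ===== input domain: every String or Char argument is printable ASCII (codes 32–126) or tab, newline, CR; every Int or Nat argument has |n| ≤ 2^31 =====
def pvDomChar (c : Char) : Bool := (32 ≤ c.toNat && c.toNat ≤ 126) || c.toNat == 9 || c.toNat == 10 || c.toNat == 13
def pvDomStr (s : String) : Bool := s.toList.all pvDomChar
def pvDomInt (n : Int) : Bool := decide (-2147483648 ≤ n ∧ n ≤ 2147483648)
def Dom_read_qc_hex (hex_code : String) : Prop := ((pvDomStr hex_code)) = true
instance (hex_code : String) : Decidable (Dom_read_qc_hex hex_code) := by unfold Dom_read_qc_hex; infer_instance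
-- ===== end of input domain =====

-- B replaces A's greedy subtract-and-check-remainder loops (plus final reversal) by a single
-- arithmetic validity test followed by one ascending enumeration of the set bits (objective: simpler).

-- ===== PORT A =====
-- loop body of both of A's 'for' loops: if 2**i <= num: num -= 2**i; tests.append(i)
def gstep (st : Int × List Int) (i : Int) : Int × List Int :=
  if (2:Int) ^ i.toNat ≤ st.1 then (st.1 - (2:Int) ^ i.toNat, st.2 ++ [i]) else st

def read_qc_hex (hex_code : String) : List Int :=
  match PySem.Int.ofStrBase? hex_code 16 with
  | none => []           -- int(hex_code, 16) raises ValueError: excluded by Pre_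
  | some n =>
    let s1 := (PySem.List.pyRange 63 56 (-1)).foldl gstep (n, [])
    let s2 := (PySem.List.pyRange 26 0 (-1)).foldl gstep s1
    if s2.1 ≠ 0 then []  -- raise ValueError: excluded by Pre_
    else (PySem.List.slice? s2.2 none none (-1)).getD []   -- tests[::-1]

-- ===== PORT B =====
def read_qc_hex_alt (hex_code : String) : List Int :=
  match PySem.Int.ofStrBase? hex_code 16 with
  | none => []           -- int(hex_code, 16) raises ValueError: excluded by Pre_
  | some num =>
    let valid := decide (0 ≤ num) && decide (num < 2 ^ 64)
      && (PySem.Int.mod num 2 == 0)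
      && (PySem.Int.mod (PySem.Int.floordiv num (2 ^ 27)) (2 ^ 30) == 0)
    if !valid then []    -- raise ValueError: excluded by Pre_
    else (PySem.List.pyRange 0 64 1).filter
      (fun i => PySem.Int.mod (PySem.Int.floordiv num ((2:Int) ^ i.toNat)) 2 == 1)

-- ===== PRECONDITION & SPEC =====
-- Pre_: the hex string parses (else int() raises ValueError) and the parsed value's set bits all
-- lie in {1..26} ∪ {57..63} (else A's decoding leaves a non-zero remainder and raises ValueError).
def pvOkBits (n : Int) : Bool :=
  decide (0 ≤ n ∧ n < 2 ^ 64 ∧ n % 2 = 0 ∧ (n / 2 ^ 27) % 2 ^ 30 = 0)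

def Pre_read_qc_hex (hex_code : String) : Prop :=
  (PySem.Int.ofStrBase? hex_code 16).any pvOkBits = true

instance (hex_code : String) : Decidable (Pre_read_qc_hex hex_code) := by
  unfold Pre_read_qc_hex; infer_instance

def pvWitness_read_qc_hex : String := "6"

def Spec_read_qc_hex (hex_code : String) (out : List Int) : Prop := out = read_qc_hex_alt hex_code
instance (hex_code : String) (out : List Int) : Decidable (Spec_read_qc_hex hex_code out) := by unfold Spec_read_qc_hex; infer_instance

-- ===== CLAIM (what is proved, stated in full; the proofs are below) =====
def Claim_equal_read_qc_hex : Prop := ∀ (hex_code : String), Dom_read_qc_hex hex_code → Pre_read_qc_hex hex_code → Spec_read_qc_hex hex_code (read_qc_hex hex_code)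

-- ===== LEMMAS AND PROOFS =====

-- [lo+k-1, lo+k-2, …, lo] : the exponent list of one of A's loops
def descList (lo : Nat) : Nat → List Int
  | 0 => []
  | k + 1 => ((lo + k : Nat) : Int) :: descList lo k

-- ascending list of the set-bit positions of n inside [lo, lo+k)
def ascBits (lo k : Nat) (n : Int) : List Int :=
  ((List.range k).map (fun j => ((lo + j : Nat) : Int))).filter
    (fun i => decide (n / (2:Int) ^ i.toNat % 2 = 1))

lemma bit_sub_mul (n c : Int) (i m : Nat) (h : i < m) :
    (n - c * 2 ^ m) / 2 ^ i % 2 = n / 2 ^ i % 2 := by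
  have h2 : (2:Int) ^ m = 2 ^ (m - i) * 2 ^ i := by
    rw [← pow_add]; congr 1; omega
  have h3 : n - c * 2 ^ m = n + (-(c * 2 ^ (m - i))) * 2 ^ i := by rw [h2]; ring
  rw [h3, Int.add_mul_ediv_right _ _ (by positivity)]
  have h4 : -(c * (2:Int) ^ (m - i)) = 2 * (-(c * 2 ^ (m - i - 1))) := by
    have : (2:Int) ^ (m - i) = 2 * 2 ^ (m - i - 1) := by
      rw [← pow_succ']; congr 1; omega
    rw [this]; ring
  rw [h4, Int.add_mul_emod_self_left]

lemma bit_mod_pow (n : Int) (i m : Nat) (h : i < m) :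
    (n % 2 ^ m) / 2 ^ i % 2 = n / 2 ^ i % 2 := by
  have : n % 2 ^ m = n - (n / 2 ^ m) * 2 ^ m := by
    rw [Int.emod_def]; ring
  rw [this, bit_sub_mul _ _ _ _ h]

lemma bit_sub_pow (n : Int) (i m : Nat) (h : i < m) :
    (n - 2 ^ m) / 2 ^ i % 2 = n / 2 ^ i % 2 := by
  have : n - (2:Int) ^ m = n - 1 * 2 ^ m := by ring
  rw [this, bit_sub_mul _ _ _ _ h]

lemma ascBits_succ (lo k : Nat) (n : Int) :
    ascBits lo (k + 1) n =
      ascBits lo k n ++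
        (if n / (2:Int) ^ (lo + k) % 2 = 1 then [((lo + k : Nat) : Int)] else []) := by
  unfold ascBits
  rw [List.range_succ, List.map_append, List.filter_append]
  have hcast : (((lo:Int)) + ((k:Int))).toNat = lo + k := by omega
  by_cases hbit : n / (2:Int) ^ (lo + k) % 2 = 1 <;> simp [hcast, hbit]

lemma ascBits_congr (lo k : Nat) (n n' : Int)
    (h : ∀ j : Nat, j < k → n / (2:Int) ^ (lo + j) % 2 = n' / (2:Int) ^ (lo + j) % 2) :
    ascBits lo k n = ascBits lo k n' := by
  unfold ascBits
  apply List.filter_congr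
  intro x hx
  simp only [List.mem_map, List.mem_range] at hx
  obtain ⟨j, hj, rfl⟩ := hx
  simp only [Int.toNat_natCast, h j hj]
  rfl


-- greedy decomposition over a descending run of exponents extracts exactly the set bits
lemma greedy (k : Nat) : ∀ (lo : Nat) (n : Int) (ts : List Int),
    0 ≤ n → n < 2 ^ (lo + k) →
    (descList lo k).foldl gstep (n, ts) = (n % 2 ^ lo, ts ++ (ascBits lo k n).reverse) := by
  induction k with
  | zero =>
    intro lo n ts h0 h1
    simp [descList, ascBits, Int.emod_eq_of_lt h0 (by simpa using h1)]
  | succ k ih =>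
    intro lo n ts h0 h1
    have hpow : (0:Int) < 2 ^ (lo + k) := by positivity
    rw [descList]
    simp only [List.foldl_cons]
    rw [gstep]
    simp only [Int.toNat_natCast]
    have hdouble : (2:Int) ^ (lo + (k + 1)) = 2 ^ (lo + k) * 2 := by
      rw [show lo + (k + 1) = (lo + k) + 1 from rfl, pow_succ]
    by_cases hc : (2:Int) ^ (lo + k) ≤ n
    · -- bit lo+k is set
      rw [if_pos hc]
      have hq1 : n / (2:Int) ^ (lo + k) = 1 := by
        rw [← PySem.Int.floordiv_eq_ediv_of_pos hpow]
        exact (PySem.Int.floordiv_eq_iff_of_pos hpow).mpr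
          ⟨by linarith, by rw [hdouble] at h1; linarith⟩
      have hbit : n / (2:Int) ^ (lo + k) % 2 = 1 := by rw [hq1]; decide
      have h1' : n - 2 ^ (lo + k) < 2 ^ (lo + k) := by
        rw [hdouble] at h1; omega
      rw [ih lo (n - 2 ^ (lo + k)) (ts ++ [((lo + k : Nat) : Int)]) (by omega) h1']
      have hm : (n - (2:Int) ^ (lo + k)) % 2 ^ lo = n % 2 ^ lo := by
        have hd : (2:Int) ^ lo ∣ 2 ^ (lo + k) := pow_dvd_pow 2 (by omega)
        rw [Int.sub_emod, Int.emod_eq_zero_of_dvd hd, sub_zero, Int.emod_emod_of_dvd _ dvd_rfl]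
      rw [hm]
      have hbits : ascBits lo (k + 1) n =
          ascBits lo k (n - 2 ^ (lo + k)) ++ [((lo + k : Nat) : Int)] := by
        rw [ascBits_succ, if_pos hbit]
        congr 1
        exact ascBits_congr lo k n (n - 2 ^ (lo + k))
          (fun j hj => (bit_sub_pow n (lo + j) (lo + k) (by omega)).symm)
      rw [hbits]
      simp
    · -- bit lo+k is clear
      rw [if_neg hc]
      have hcl : n < 2 ^ (lo + k) := lt_of_not_ge hc
      rw [ih lo n ts h0 hcl]
      have hbit : n / (2:Int) ^ (lo + k) % 2 = 0 := by
        simp [Int.ediv_eq_zero_of_lt h0 hcl]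
      have : ascBits lo (k + 1) n = ascBits lo k n := by
        rw [ascBits_succ, hbit]; simp
      rw [this]

lemma ascBits_split (lo k1 k2 : Nat) (n : Int) :
    ascBits lo (k1 + k2) n = ascBits lo k1 n ++ ascBits (lo + k1) k2 n := by
  unfold ascBits
  rw [List.range_add, List.map_append, List.filter_append]
  congr 2
  rw [List.map_map]
  congr 1
  funext j
  simp only [Function.comp_apply]
  push_cast
  ring

lemma descList_63 : PySem.List.pyRange 63 56 (-1) = descList 57 7 := by decide
lemma descList_26 : PySem.List.pyRange 26 0 (-1) = descList 1 26 := by decide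

-- the core equality, as a function of the parsed integer
set_option maxRecDepth 4096 in
lemma core_eq (n : Int) (h0 : 0 ≤ n) (h64 : n < 2 ^ 64) (h2 : n % 2 = 0)
    (hmid : (n / 2 ^ 27) % 2 ^ 30 = 0) :
    (let s1 := (PySem.List.pyRange 63 56 (-1)).foldl gstep (n, ([] : List Int))
     let s2 := (PySem.List.pyRange 26 0 (-1)).foldl gstep s1
     if s2.1 ≠ 0 then ([] : List Int)
     else (PySem.List.slice? s2.2 none none (-1)).getD []) =
    (PySem.List.pyRange 0 64 1).filter
      (fun i => PySem.Int.mod (PySem.Int.floordiv n ((2:Int) ^ i.toNat)) 2 == 1) := by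
  -- first loop
  rw [descList_63, descList_26]
  show (if ((descList 1 26).foldl gstep ((descList 57 7).foldl gstep (n, ([] : List Int)))).1 ≠ 0
      then ([] : List Int)
      else (PySem.List.slice? ((descList 1 26).foldl gstep
        ((descList 57 7).foldl gstep (n, ([] : List Int)))).2 none none (-1)).getD []) = _
  have h1 : (descList 57 7).foldl gstep (n, ([] : List Int)) =
      (n % 2 ^ 57, [] ++ (ascBits 57 7 n).reverse) := greedy 7 57 n [] h0 (by simpa using h64)
  rw [h1]
  -- bits 27..56 of n vanish, so n % 2^57 = n % 2^27 < 2^27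
  have hmid' : n % 2 ^ 57 = n % 2 ^ 27 := by norm_num at h64 hmid ⊢; omega
  have hlow : 0 ≤ n % 2 ^ 27 ∧ n % 2 ^ 27 < 2 ^ 27 := by norm_num; omega
  -- second loop
  have h2' : (descList 1 26).foldl gstep (n % 2 ^ 57, [] ++ (ascBits 57 7 n).reverse) =
      ((n % 2 ^ 57) % 2 ^ 1,
        ([] ++ (ascBits 57 7 n).reverse) ++ (ascBits 1 26 (n % 2 ^ 57)).reverse) := by
    apply greedy 26 1 _ _ (by rw [hmid']; exact hlow.1) (by rw [hmid']; norm_num at hlow ⊢; omega)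
  rw [h2']
  have hz : (n % 2 ^ 57) % 2 ^ 1 = 0 := by rw [hmid']; norm_num; omega
  simp only [hz, ne_eq, not_true_eq_false, if_false, List.nil_append,
    PySem.List.slice?_none_none_neg_one, Option.getD_some]
  rw [List.reverse_append, List.reverse_reverse, List.reverse_reverse]
  -- rewrite the second loop's bits back to bits of n
  have hcongr : ascBits 1 26 (n % 2 ^ 57) = ascBits 1 26 n :=
    ascBits_congr 1 26 (n % 2 ^ 57) n (fun j hj => bit_mod_pow n (1 + j) 57 (by omega))
  rw [hcongr]
  -- B's filter is ascBits 0 64 n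
  have hB : (PySem.List.pyRange 0 64 1).filter
      (fun i => PySem.Int.mod (PySem.Int.floordiv n ((2:Int) ^ i.toNat)) 2 == 1) =
      ascBits 0 64 n := by
    have h64' : PySem.List.pyRange 0 64 1 = (List.range 64).map (fun k : Nat => (k : Int)) := by
      have := PySem.List.pyRange_zero_natCast 64
      simpa using this
    rw [h64']
    unfold ascBits
    rw [List.filter_map, List.filter_map]
    congr 1
    · funext j; simp
    · apply List.filter_congr
      intro j _
      have hp : (0:Int) < 2 ^ ((j : Int).toNat) := by positivity
      simp only [Function.comp_apply]
      rw [PySem.Int.floordiv_eq_ediv_of_pos hp,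
        PySem.Int.mod_eq_emod_of_pos (by norm_num : (0:Int) < 2)]
      rw [Nat.zero_add]
      rfl
  rw [hB]
  -- split [0,64) = [0,1) ++ [1,27) ++ [27,57) ++ [57,64)
  have hsplit : ascBits 0 64 n =
      ascBits 0 1 n ++ (ascBits 1 26 n ++ (ascBits 27 30 n ++ ascBits 57 7 n)) := by
    have e1 : ascBits 0 64 n = ascBits 0 1 n ++ ascBits 1 63 n := ascBits_split 0 1 63 n
    have e2 : ascBits 1 63 n = ascBits 1 26 n ++ ascBits 27 37 n := ascBits_split 1 26 37 n
    have e3 : ascBits 27 37 n = ascBits 27 30 n ++ ascBits 57 7 n := ascBits_split 27 30 7 n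
    rw [e1, e2, e3]
  rw [hsplit]
  -- bit 0 is clear
  have hb0 : ascBits 0 1 n = [] := by
    simp [ascBits]
    omega
  -- bits 27..56 are clear
  have hbmid : ascBits 27 30 n = [] := by
    unfold ascBits
    rw [List.filter_eq_nil_iff]
    intro x hx
    simp only [List.mem_map, List.mem_range] at hx
    obtain ⟨j, hj, rfl⟩ := hx
    simp only [Int.toNat_natCast, decide_eq_true_eq]
    intro hbit
    -- n / 2^(27+j) % 2 = 0 from hmid
    have : n / (2:Int) ^ (27 + j) % 2 = 0 := by
      have hq : n / (2:Int) ^ (27 + j) = (n / 2 ^ 27) / 2 ^ j := by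
        rw [Int.ediv_ediv_of_nonneg (by positivity : (0:Int) ≤ 2 ^ 27), ← pow_add]
      rw [hq]
      obtain ⟨q', hq'⟩ : (2:Int) ^ 30 ∣ n / 2 ^ 27 := Int.dvd_of_emod_eq_zero hmid
      rw [hq']
      have hsp : (2:Int) ^ 30 = 2 ^ j * 2 ^ (1 + (29 - j)) := by
        rw [← pow_add]; congr 1; omega
      have e : (2:Int) ^ 30 * q' = (2 * 2 ^ (29 - j) * q') * 2 ^ j := by
        rw [hsp, pow_add, pow_one]; ring
      rw [e, Int.mul_ediv_cancel _ (by positivity : (0:Int) < 2 ^ j).ne']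
      rw [mul_assoc]
      exact Int.mul_emod_right 2 _
    rw [this] at hbit; norm_num at hbit
  rw [hb0, hbmid]
  simp

-- ===== VERDICT (by name: the statement is the Claim_ definition above) =====
theorem read_qc_hex_spec : Claim_equal_read_qc_hex := by
  intro s _ hpre
  unfold Spec_read_qc_hex
  unfold Pre_read_qc_hex at hpre
  unfold read_qc_hex read_qc_hex_alt
  cases hp : PySem.Int.ofStrBase? s 16 with
  | none => rfl
  | some n =>
    rw [hp] at hpre
    simp only [Option.any_some, pvOkBits, decide_eq_true_eq] at hpre
    obtain ⟨h0, h64, h2, hmid⟩ := hpre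
    have hv : (decide (0 ≤ n) && decide (n < 2 ^ 64)
        && (PySem.Int.mod n 2 == 0)
        && (PySem.Int.mod (PySem.Int.floordiv n (2 ^ 27)) (2 ^ 30) == 0)) = true := by
      have e1 : PySem.Int.mod n 2 = n % 2 := PySem.Int.mod_eq_emod_of_pos (by norm_num)
      have e2 : PySem.Int.floordiv n (2 ^ 27) = n / 2 ^ 27 :=
        PySem.Int.floordiv_eq_ediv_of_pos (by positivity)
      have e3 : PySem.Int.mod (n / 2 ^ 27) (2 ^ 30) = (n / 2 ^ 27) % 2 ^ 30 :=
        PySem.Int.mod_eq_emod_of_pos (by positivity)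
      rw [e1, e2, e3]
      simp only [Bool.and_eq_true, decide_eq_true_eq, beq_iff_eq]
      exact ⟨⟨⟨h0, h64⟩, h2⟩, hmid⟩
    simp only [hv, Bool.not_true, Bool.false_eq_true, if_false]
    exact core_eq n h0 h64 h2 hmid
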